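-- pv_equiv track=rewrite | github.com/cserby/aoc2021 | day14/day14.py | count_elements_except_last
-- ===== SOURCE A (Python) =====
-- def count_elements_except_last(pair_counter):
--     element_counter = dict()
--     for pair in pair_counter.keys():
--         try:
--             element_counter[pair[0]] += pair_counter[pair]
--         except KeyError:
--             element_counter[pair[0]] = pair_counter[pair]
--     return element_counter
-- ===== SOURCE B (Python) =====
-- def count_elements_except_last(pair_counter):
--     firsts = dict.fromkeys(k[0] for k in pair_counter)
--     return {c: sum(v for k, v in pair_counter.items() if k[0] == c)
--             for c in firsts}
-- ===== Notes on version B (the rewrite author's own statement) =====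
-- stated objective: simpler
-- what changed: A does a single accumulating scan into a dict with try/except KeyError; B first collects the distinct first characters in order of first occurrence (dict.fromkeys) and then builds the result with one filtered sum per distinct first character.
import Mathlib
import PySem

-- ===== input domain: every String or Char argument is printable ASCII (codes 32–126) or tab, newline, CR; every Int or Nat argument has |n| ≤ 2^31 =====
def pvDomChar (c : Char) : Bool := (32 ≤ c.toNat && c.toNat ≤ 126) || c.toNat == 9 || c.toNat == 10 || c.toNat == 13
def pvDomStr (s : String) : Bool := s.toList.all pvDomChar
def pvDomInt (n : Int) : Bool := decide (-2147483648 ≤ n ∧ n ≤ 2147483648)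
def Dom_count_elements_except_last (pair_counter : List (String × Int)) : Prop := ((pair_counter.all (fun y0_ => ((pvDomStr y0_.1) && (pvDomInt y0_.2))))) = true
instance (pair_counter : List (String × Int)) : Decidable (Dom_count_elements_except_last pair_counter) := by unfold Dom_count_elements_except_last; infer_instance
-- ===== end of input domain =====

-- B replaces A's accumulating dict scan by: ordered dedup of first characters, then one filtered sum per distinct first character (objective: simpler).

-- shared helper: pair[0], the first character of a key (as a 1-char string; Pre_ keeps keys nonempty, so pyGet? is some)
def pvFirst (s : String) : String := ((PySem.Str.pyGet? s 0).map (fun c => String.ofList [c])).getD ""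

-- ===== PORT A =====
def count_elements_except_last (pair_counter : List (String × Int)) : List (String × Int) :=
  (pair_counter.foldl
    (fun (ec : PySem.Dict String Int) pair =>
      match ec.get? (pvFirst pair.1) with
      | some prev => ec.insert (pvFirst pair.1) (prev + pair.2)   -- try: ec[pair[0]] += pair_counter[pair]
      | none => ec.insert (pvFirst pair.1) pair.2)                -- except KeyError: ec[pair[0]] = pair_counter[pair]
    PySem.Dict.empty).items

-- ===== PORT B =====
def count_elements_except_last_alt (pair_counter : List (String × Int)) : List (String × Int) :=
  let firsts := PySem.List.dedup (pair_counter.map (fun p => pvFirst p.1))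
  firsts.map (fun c => (c, ((pair_counter.filter (fun p => pvFirst p.1 == c)).map (·.2)).sum))

-- ===== PRECONDITION & SPEC =====
-- Pre_ excludes empty-string keys, on which Python A raises IndexError (pair[0]), and duplicate keys,
-- which a Python dict argument cannot carry (the association list represents a dict).
def Pre_count_elements_except_last (pair_counter : List (String × Int)) : Prop :=
  (pair_counter.map (·.1)).Nodup ∧ ∀ p ∈ pair_counter, p.1 ≠ ""
instance (pair_counter : List (String × Int)) : Decidable (Pre_count_elements_except_last pair_counter) := by unfold Pre_count_elements_except_last; infer_instance
def pvWitness_count_elements_except_last : (List (String × Int)) := [("NN", 3), ("NC", 1), ("CB", 2)]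

def Spec_count_elements_except_last (pair_counter : List (String × Int)) (out : List (String × Int)) : Prop := out = count_elements_except_last_alt pair_counter
instance (pair_counter : List (String × Int)) (out : List (String × Int)) : Decidable (Spec_count_elements_except_last pair_counter out) := by unfold Spec_count_elements_except_last; infer_instance

-- ===== CLAIM (what is proved, stated in full; the proofs are below) =====
def Claim_equal_count_elements_except_last : Prop := ∀ (pair_counter : List (String × Int)), Dom_count_elements_except_last pair_counter → Pre_count_elements_except_last pair_counter → Spec_count_elements_except_last pair_counter (count_elements_except_last pair_counter)

-- ===== LEMMAS AND PROOFS =====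

-- A's try/except step is the modify-with-default-0 step
theorem pvStep_eq (ec : PySem.Dict String Int) (pair : String × Int) :
    (match ec.get? (pvFirst pair.1) with
      | some prev => ec.insert (pvFirst pair.1) (prev + pair.2)
      | none => ec.insert (pvFirst pair.1) pair.2)
    = ec.modify (pvFirst pair.1) 0 (· + pair.2) := by
  cases h : ec.get? (pvFirst pair.1) <;>
    simp [PySem.Dict.modify, PySem.Dict.getD_eq_get?_getD, h]

theorem pvFold_eq (l : List (String × Int)) (d : PySem.Dict String Int) :
    l.foldl
      (fun (ec : PySem.Dict String Int) pair =>
        match ec.get? (pvFirst pair.1) with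
        | some prev => ec.insert (pvFirst pair.1) (prev + pair.2)
        | none => ec.insert (pvFirst pair.1) pair.2) d
    = l.foldl (fun ec pair => ec.modify (pvFirst pair.1) 0 (· + pair.2)) d := by
  simp only [pvStep_eq]

theorem pvGetD_fold (l : List (String × Int)) (d : PySem.Dict String Int) (c : String) :
    (l.foldl (fun ec pair => ec.modify (pvFirst pair.1) 0 (· + pair.2)) d).getD c 0
    = d.getD c 0 + ((l.filter (fun p => pvFirst p.1 == c)).map (·.2)).sum := by
  induction l generalizing d with
  | nil => simp
  | cons p t ih =>
      simp only [List.foldl_cons, ih, List.filter_cons]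
      by_cases h : pvFirst p.1 = c
      · simp [h]
        ring
      · simp [h]
        rw [PySem.Dict.getD_modify_of_ne]
        exact Ne.symm h

-- ===== VERDICT (by name: the statement is the Claim_ definition above) =====
theorem count_elements_except_last_spec : Claim_equal_count_elements_except_last := by
  intro pc _ _
  unfold Spec_count_elements_except_last count_elements_except_last count_elements_except_last_alt
  rw [pvFold_eq]
  have hnd : (pc.foldl (fun ec pair => ec.modify (pvFirst pair.1) 0 (· + pair.2))
      PySem.Dict.empty).keys.Nodup := by
    exact PySem.Dict.nodup_keys_foldl_modify_key pc (fun p => pvFirst p.1) 0 _ _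
      PySem.Dict.nodup_keys_empty
  rw [PySem.Dict.items_eq_map_keys _ hnd 0]
  have hkeys : (pc.foldl (fun ec pair => ec.modify (pvFirst pair.1) 0 (· + pair.2))
      PySem.Dict.empty).keys = PySem.List.dedup (pc.map (fun p => pvFirst p.1)) := by
    rw [PySem.Dict.keys_foldl_modify_key]
    simp [PySem.Dict.keys_empty, PySem.Set.update_nil_left]
  rw [hkeys]
  apply List.map_congr_left
  intro c _
  simp [pvGetD_fold]
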